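-- pv_equiv track=rewrite | github.com/mahsageshvadi/MazeRL | DSA/Synth_simple_v1_5_paper_version.py | disk_offsets
-- ===== SOURCE A (Python) =====
-- def disk_offsets(radius: int):
--     offs = []
--     r2 = radius * radius
--     for dy in range(-radius, radius+1):
--         for dx in range(-radius, radius+1):
--             if dy*dy + dx*dx <= r2:
--                 offs.append((dy, dx))
--     return offs
-- ===== SOURCE B (Python) =====
-- import math
--
-- def disk_offsets(radius: int):
--     r2 = radius * radius
--     rows = [(-dy, math.isqrt(r2 - dy * dy)) for dy in range(radius, 0, -1)] \
--          + [(dy, math.isqrt(r2 - dy * dy)) for dy in range(radius + 1)]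
--     return [(dy, dx) for dy, m in rows for dx in range(-m, m + 1)]
-- ===== Notes on version B (the rewrite author's own statement) =====
-- stated objective: alternative
-- what changed: B first builds a list of rows: for each |dy| the exact half-width math.isqrt(r2-dy*dy) (negative rows produced by mirroring, since the width depends only on |dy|), then flattens each row's dx range with a comprehension; no per-cell distance test and no nested scan of the bounding square remains.
import Mathlib
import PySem

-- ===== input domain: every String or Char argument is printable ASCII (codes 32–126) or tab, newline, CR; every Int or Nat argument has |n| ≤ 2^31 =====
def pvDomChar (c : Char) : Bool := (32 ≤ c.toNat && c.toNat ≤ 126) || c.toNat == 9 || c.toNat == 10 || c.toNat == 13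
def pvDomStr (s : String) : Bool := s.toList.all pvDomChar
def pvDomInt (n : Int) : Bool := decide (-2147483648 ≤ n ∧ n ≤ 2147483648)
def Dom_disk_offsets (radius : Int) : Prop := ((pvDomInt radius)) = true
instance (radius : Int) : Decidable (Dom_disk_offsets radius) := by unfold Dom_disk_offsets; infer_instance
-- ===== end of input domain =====

-- B builds per-row half-widths with isqrt (mirroring negative rows) and flattens the rows; no per-cell distance test.

-- ===== PORT A =====
def disk_offsets (radius : Int) : List (Int × Int) :=
  let r2 := radius * radius
  (PySem.List.pyRange (-radius) (radius + 1) 1).foldl (fun offs dy =>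
    (PySem.List.pyRange (-radius) (radius + 1) 1).foldl (fun offs dx =>
      if dy * dy + dx * dx ≤ r2 then offs ++ [(dy, dx)] else offs) offs) []

-- ===== PORT B =====
-- math.isqrt n (n ≥ 0 wherever B evaluates it) ported as Nat.sqrt of toNat
def disk_offsets_alt (radius : Int) : List (Int × Int) :=
  let r2 := radius * radius
  let rows : List (Int × Int) :=
    (PySem.List.pyRange radius 0 (-1)).map (fun dy => (-dy, (((r2 - dy * dy).toNat.sqrt : Nat) : Int)))
    ++ (PySem.List.pyRange 0 (radius + 1) 1).map (fun dy => (dy, (((r2 - dy * dy).toNat.sqrt : Nat) : Int)))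
  rows.flatMap (fun p => (PySem.List.pyRange (-p.2) (p.2 + 1) 1).map (fun dx => (p.1, dx)))

-- ===== PRECONDITION & SPEC =====
def Spec_disk_offsets (radius : Int) (out : List (Int × Int)) : Prop := out = disk_offsets_alt radius
instance (radius : Int) (out : List (Int × Int)) : Decidable (Spec_disk_offsets radius out) := by unfold Spec_disk_offsets; infer_instance

-- ===== CLAIM (what is proved, stated in full; the proofs are below) =====
def Claim_equal_disk_offsets : Prop := ∀ (radius : Int), Dom_disk_offsets radius → Spec_disk_offsets radius (disk_offsets radius)

-- ===== LEMMAS AND PROOFS =====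

-- filtering an integer range by an interval test yields a range
theorem pv_filter_range_interval (c d : Int) : ∀ (n : Nat) (a b : Int), (b - a).toNat = n →
    (PySem.List.pyRange a b 1).filter (fun x => decide (c ≤ x ∧ x ≤ d))
      = PySem.List.pyRange (max a c) (min b (d + 1)) 1 := by
  intro n
  induction n with
  | zero =>
    intro a b h
    rw [PySem.List.pyRange_one_eq_nil (by omega), PySem.List.pyRange_one_eq_nil (by omega)]
    rfl
  | succ n ih =>
    intro a b h
    rw [PySem.List.pyRange_one_cons (by omega), List.filter_cons]
    by_cases hc : c ≤ a ∧ a ≤ d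
    · have ht : decide (c ≤ a ∧ a ≤ d) = true := by simp [hc.1, hc.2]
      rw [ht, if_pos rfl, ih (a + 1) b (by omega)]
      have h1 : max (a + 1) c = a + 1 := by omega
      have hrhs : PySem.List.pyRange (max a c) (min b (d + 1)) 1
          = a :: PySem.List.pyRange (a + 1) (min b (d + 1)) 1 := by
        have h2 : max a c = a := by omega
        rw [h2]; exact PySem.List.pyRange_one_cons (by omega)
      rw [h1, hrhs]
    · have ht : decide (c ≤ a ∧ a ≤ d) = false := decide_eq_false hc
      rw [ht, if_neg (by simp), ih (a + 1) b (by omega)]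
      by_cases hd : a < c
      · have : max (a + 1) c = max a c := by omega
        rw [this]
      · rw [PySem.List.pyRange_one_eq_nil (by omega),
            PySem.List.pyRange_one_eq_nil (by omega)]

-- the distance test over a row is the interval test for the isqrt half-width
theorem pv_cond_iff (r dy dx : Int) (hdy : dy * dy ≤ r * r) :
    (dy * dy + dx * dx ≤ r * r) ↔
      (-(((r * r - dy * dy).toNat.sqrt : Nat) : Int) ≤ dx ∧ dx ≤ (((r * r - dy * dy).toNat.sqrt : Nat) : Int)) := by
  have hnn : ((dx.natAbs * dx.natAbs : Nat) : Int) = dx * dx := Int.natAbs_mul_self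
  have key : dy * dy + dx * dx ≤ r * r ↔ dx.natAbs ≤ (r * r - dy * dy).toNat.sqrt := by
    rw [Nat.le_sqrt]
    omega
  rw [key]
  omega

theorem pv_sqrt_le (r dy : Int) (hr : 0 ≤ r) (_hdy : dy * dy ≤ r * r) :
    (((r * r - dy * dy).toNat.sqrt : Nat) : Int) ≤ r := by
  have hrr : ((r.toNat * r.toNat : Nat) : Int) = r * r := by
    push_cast; rw [Int.toNat_of_nonneg hr]
  have hd0 : 0 ≤ dy * dy := mul_self_nonneg dy
  have h1 : (r * r - dy * dy).toNat ≤ r.toNat * r.toNat := by omega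
  have h2 : (r * r - dy * dy).toNat.sqrt ≤ (r.toNat * r.toNat).sqrt := Nat.sqrt_le_sqrt h1
  rw [Nat.sqrt_eq] at h2
  omega

-- A's inner row, as a range of exact half-width
theorem pv_row (r dy : Int) (hdy : dy ∈ PySem.List.pyRange (-r) (r + 1) 1) :
    (PySem.List.pyRange (-r) (r + 1) 1).filter (fun dx => decide (dy * dy + dx * dx ≤ r * r))
      = PySem.List.pyRange (-(((r * r - dy * dy).toNat.sqrt : Nat) : Int))
          ((((r * r - dy * dy).toNat.sqrt : Nat) : Int) + 1) 1 := by
  rw [PySem.List.mem_pyRange_one] at hdy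
  have hr : 0 ≤ r := by omega
  have hdy2 : dy * dy ≤ r * r := by nlinarith
  set m : Int := (((r * r - dy * dy).toNat.sqrt : Nat) : Int) with hm
  have hm0 : 0 ≤ m := by positivity
  have hmr : m ≤ r := pv_sqrt_le r dy hr hdy2
  have hcong : (PySem.List.pyRange (-r) (r + 1) 1).filter (fun dx => decide (dy * dy + dx * dx ≤ r * r))
      = (PySem.List.pyRange (-r) (r + 1) 1).filter (fun dx => decide (-m ≤ dx ∧ dx ≤ m)) := by
    apply List.filter_congr
    intro x _
    simp only [decide_eq_decide]
    exact pv_cond_iff r dy x hdy2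
  rw [hcong, pv_filter_range_interval (-m) m (r + 1 - -r).toNat (-r) (r + 1) rfl]
  have h1 : max (-r) (-m) = -m := by omega
  have h2 : min (r + 1) (m + 1) = m + 1 := by omega
  rw [h1, h2]

-- mapping negation over a countdown range gives an ascending range
theorem pv_map_neg_countdown (a : Int) :
    (PySem.List.pyRange a 0 (-1)).map (fun x => -x) = PySem.List.pyRange (-a) 0 1 := by
  rw [PySem.List.pyRange_neg_one, PySem.List.pyRange_one]
  rw [List.map_map]
  have : (a - 0).toNat = (0 - -a).toNat := by omega
  rw [this]
  apply List.map_congr_left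
  intro k _
  simp only [Function.comp]
  omega

-- A as a flatMap of exact rows over the full dy range
theorem pv_A_flatMap (r : Int) :
    disk_offsets r = (PySem.List.pyRange (-r) (r + 1) 1).flatMap (fun dy =>
      (PySem.List.pyRange (-(((r * r - dy * dy).toNat.sqrt : Nat) : Int))
        ((((r * r - dy * dy).toNat.sqrt : Nat) : Int) + 1) 1).map (fun dx => (dy, dx))) := by
  unfold disk_offsets
  simp only []
  rw [show ((PySem.List.pyRange (-r) (r + 1) 1).foldl (fun offs dy =>
        (PySem.List.pyRange (-r) (r + 1) 1).foldl (fun offs dx =>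
          if dy * dy + dx * dx ≤ r * r then offs ++ [(dy, dx)] else offs) offs) [])
      = (PySem.List.pyRange (-r) (r + 1) 1).foldl (fun offs dy => offs ++
          (PySem.List.pyRange (-(((r * r - dy * dy).toNat.sqrt : Nat) : Int))
            ((((r * r - dy * dy).toNat.sqrt : Nat) : Int) + 1) 1).map (fun dx => (dy, dx))) []
    from ?_]
  · exact PySem.List.foldl_append_eq_flatMap _ _ _
  · apply PySem.List.foldl_congr_mem
    intro acc dy hdy
    rw [PySem.List.foldl_append_ite (p := fun dx => dy * dy + dx * dx ≤ r * r)
          (f := fun dx => (dy, dx)), pv_row r dy hdy]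

-- ===== VERDICT (by name: the statement is the Claim_ definition above) =====
theorem disk_offsets_spec : Claim_equal_disk_offsets := by
  intro r _
  unfold Spec_disk_offsets disk_offsets_alt
  rw [pv_A_flatMap r]
  simp only []
  rw [List.flatMap_append, List.flatMap_map, List.flatMap_map]
  by_cases hr : 0 ≤ r
  · rw [PySem.List.pyRange_one_append (-r) 0 (r + 1) (by omega) (by omega), List.flatMap_append]
    congr 1
    · -- negative rows: A over pyRange (-r) 0 1, B over the mirrored countdown
      rw [← pv_map_neg_countdown r, List.flatMap_map]
      apply List.flatMap_congr
      intro x _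
      have hx : -x * -x = x * x := by ring
      rw [hx]
  · rw [PySem.List.pyRange_one_eq_nil (by omega), PySem.List.pyRange_neg_one_eq_nil (by omega),
        PySem.List.pyRange_one_eq_nil (by omega)]
    simp
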